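-- pv_equiv track=rewrite | github.com/Alexandra-Vogt/euler | python/even-fib.py | getEvenFibNums
-- ===== SOURCE A (Python) =====
-- def getEvenFibNums(target_val):
--     nums = []
--     prev_val = 0
--     temp = 0
--     val = 1
--     while val < target_val:
--         if val % 2 == 0:
--             nums.append(val)
--         temp = val
--         val = temp + prev_val
--         prev_val = temp
--     return nums
-- ===== SOURCE B (Python) =====
-- def getEvenFibNums(target_val):
--     nums = []
--     a, b = 2, 8
--     while a < target_val:
--         nums.append(a)
--         a, b = b, 4 * b + a
--     return nums
-- ===== Notes on version B (the rewrite author's own statement) =====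
-- stated objective: simpler
-- what changed: B generates the even Fibonacci subsequence directly via its own second-order recurrence (each even term is four times the previous even term plus the one before), dropping the parity test and the iteration over the odd Fibonacci terms.
import Mathlib
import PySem

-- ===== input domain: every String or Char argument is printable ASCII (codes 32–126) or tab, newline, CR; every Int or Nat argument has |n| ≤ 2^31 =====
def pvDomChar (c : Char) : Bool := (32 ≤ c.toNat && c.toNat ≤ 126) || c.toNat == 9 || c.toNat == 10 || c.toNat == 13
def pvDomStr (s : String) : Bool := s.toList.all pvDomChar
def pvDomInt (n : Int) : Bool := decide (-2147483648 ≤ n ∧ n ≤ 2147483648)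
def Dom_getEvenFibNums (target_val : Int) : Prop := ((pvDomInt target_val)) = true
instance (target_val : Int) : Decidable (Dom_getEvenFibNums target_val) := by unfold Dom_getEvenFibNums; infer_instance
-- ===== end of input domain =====

-- B generates even Fibonacci numbers directly via their own second-order recurrence, skipping odd terms and the parity test; simpler, same results.


-- ===== PORT A =====
-- A's while loop; the invariant argument only justifies termination of the
-- Fibonacci iteration (it always holds on A's actual start state 0, 1).
def fibLoopA (target_val : Int) (nums : List Int) (prev_val val : Int)
    (h : 0 ≤ prev_val ∧ prev_val ≤ val ∧ 1 ≤ val) : List Int :=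
  if hlt : val < target_val then
    let nums' := if val % 2 = 0 then nums ++ [val] else nums
    let temp := val
    fibLoopA target_val nums' temp (temp + prev_val) ⟨by omega, by omega, by omega⟩
  else nums
termination_by (2 * target_val - val - prev_val).toNat
decreasing_by omega

def getEvenFibNums (target_val : Int) : List Int :=
  fibLoopA target_val [] 0 1 ⟨by omega, by omega, by omega⟩

-- ===== PORT B =====
-- B's while loop over the even-Fibonacci recurrence; invariant argument for termination.
def evenLoopB (target_val : Int) (nums : List Int) (a b : Int)
    (h : 2 ≤ a ∧ a < b) : List Int :=
  if hlt : a < target_val then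
    evenLoopB target_val (nums ++ [a]) b (4 * b + a) ⟨by omega, by omega⟩
  else nums
termination_by (target_val - a).toNat
decreasing_by omega

def getEvenFibNums_alt (target_val : Int) : List Int :=
  evenLoopB target_val [] 2 8 ⟨by omega, by omega⟩

-- ===== PRECONDITION & SPEC =====
def Spec_getEvenFibNums (target_val : Int) (out : List Int) : Prop := out = getEvenFibNums_alt target_val
instance (target_val : Int) (out : List Int) : Decidable (Spec_getEvenFibNums target_val out) := by unfold Spec_getEvenFibNums; infer_instance

-- ===== CLAIM (what is proved, stated in full; the proofs are below) =====
def Claim_equal_getEvenFibNums : Prop := ∀ (target_val : Int), Dom_getEvenFibNums target_val → Spec_getEvenFibNums target_val (getEvenFibNums target_val)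

-- ===== LEMMAS AND PROOFS =====

lemma evenLoopB_congr (t : Int) (l1 l2 : List Int) (a1 a2 b1 b2 : Int)
    (h1 : 2 ≤ a1 ∧ a1 < b1) (h2 : 2 ≤ a2 ∧ a2 < b2)
    (hl : l1 = l2) (ha : a1 = a2) (hb : b1 = b2) :
    evenLoopB t l1 a1 b1 h1 = evenLoopB t l2 a2 b2 h2 := by
  subst hl; subst ha; subst hb; rfl

-- Three iterations of A's loop from an (even, odd) state (p, v) pass exactly one
-- even Fibonacci value 2v+p, matching one iteration of B's loop.
lemma bridge (n : Nat) : ∀ (nums : List Int) (p v t : Int)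
    (hA : 0 ≤ p ∧ p ≤ v ∧ 1 ≤ v) (hp2 : p % 2 = 0) (hv2 : v % 2 = 1)
    (hn : (2 * t - v - p).toNat ≤ n),
    fibLoopA t nums p v hA =
      evenLoopB t nums (2 * v + p) (8 * v + 5 * p) ⟨by omega, by omega⟩ := by
  induction n with
  | zero =>
    intro nums p v t hA hp2 hv2 hn
    rw [fibLoopA, evenLoopB]
    rw [dif_neg (by omega), dif_neg (by omega)]
  | succ n ih =>
    intro nums p v t hA hp2 hv2 hn
    rw [fibLoopA]
    by_cases h1 : v < t
    · rw [dif_pos h1]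
      simp only [if_neg (show ¬ v % 2 = 0 by omega)]
      rw [fibLoopA]
      by_cases h2 : v + p < t
      · rw [dif_pos h2]
        simp only [if_neg (show ¬ (v + p) % 2 = 0 by omega)]
        rw [fibLoopA]
        by_cases h3 : (v + p) + v < t
        · rw [dif_pos h3]
          simp only [if_pos (show ((v + p) + v) % 2 = 0 by omega)]
          rw [ih (nums ++ [(v + p) + v]) ((v + p) + v) ((v + p) + v + (v + p)) t
            ⟨by omega, by omega, by omega⟩ (by omega) (by omega) (by omega)]
          conv_rhs => rw [evenLoopB]
          rw [dif_pos (show 2 * v + p < t by omega)]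
          exact evenLoopB_congr _ _ _ _ _ _ _ _ _ (by congr 2; omega) (by ring) (by ring)
        · rw [dif_neg h3, evenLoopB, dif_neg (by omega)]
      · rw [dif_neg h2, evenLoopB, dif_neg (by omega)]
    · rw [dif_neg h1, evenLoopB, dif_neg (by omega)]

-- ===== VERDICT (by name: the statement is the Claim_ definition above) =====
theorem getEvenFibNums_spec : Claim_equal_getEvenFibNums := by
  intro t _
  unfold Spec_getEvenFibNums getEvenFibNums getEvenFibNums_alt
  exact (bridge (2 * t - 1).toNat [] 0 1 t ⟨by omega, by omega, by omega⟩
    (by omega) (by omega) (by omega)).trans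
    (evenLoopB_congr _ _ _ _ _ _ _ _ _ rfl (by norm_num) (by norm_num))
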